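-- pv_equiv track=rewrite | github.com/elophanto/EloPhanto | core/tool_profiles.py | trim_tools_for_limit
-- ===== SOURCE A (Python) =====
-- from typing import Any
--
-- def trim_tools_for_limit(
--     tools: list[dict[str, Any]],
--     limit: int,
--     recently_used: set[str] | None = None,
-- ) -> list[dict[str, Any]]:
--     """Drop lowest-priority tool schemas to fit a provider's tool limit.
--
--     This is the last-resort fallback after profile filtering. If the
--     profile-filtered set still exceeds the limit (e.g. browser alone has
--     46 tools), drop tools from low-priority groups first.
--
--     Tools in ``recently_used`` are never dropped — they are pinned to
--     prevent the agent from losing access to tools mid-conversation.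
--     """
--     if limit <= 0 or len(tools) <= limit:
--         return tools
--
--     low_priority_prefixes = (
--         "mcp_",
--         "commune_",
--         "replicate_",
--         "deploy_",
--         "deployment_",
--         "create_database",
--         "desktop_",
--         "organization_",
--         "totp_",
--     )
--
--     # If any tool from a low-priority group was recently used, pin the
--     # entire group so sibling tools (e.g. commune_comment when
--     # commune_home was used) remain available.
--     pinned_prefixes: set[str] = set()
--     if recently_used:
--         for used_name in recently_used:
--             for prefix in low_priority_prefixes:
--                 if used_name.startswith(prefix):
--                     pinned_prefixes.add(prefix)
--                     break
--
--     core: list[dict[str, Any]] = []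
--     low: list[dict[str, Any]] = []
--     for tool in tools:
--         name = tool.get("function", {}).get("name", "")
--         if any(name.startswith(p) for p in pinned_prefixes):
--             core.append(tool)
--         elif any(name.startswith(p) for p in low_priority_prefixes):
--             low.append(tool)
--         else:
--             core.append(tool)
--
--     remaining = limit - len(core)
--     if remaining > 0:
--         return core + low[:remaining]
--     return core[:limit]
-- ===== SOURCE B (Python) =====
-- def trim_tools_for_limit(
--     tools,
--     limit,
--     recently_used=None,
-- ):
--     """Drop lowest-priority tool schemas to fit a provider's tool limit.
--
--     Same guard and pinning rule as before; the trimming itself is done by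
--     stable-sorting on a binary priority key and slicing, instead of
--     building separate core/low buckets and concatenating.
--     """
--     if limit <= 0 or len(tools) <= limit:
--         return tools
--
--     low_priority_prefixes = (
--         "mcp_",
--         "commune_",
--         "replicate_",
--         "deploy_",
--         "deployment_",
--         "create_database",
--         "desktop_",
--         "organization_",
--         "totp_",
--     )
--
--     pinned_prefixes = set()
--     if recently_used:
--         for used_name in recently_used:
--             for prefix in low_priority_prefixes:
--                 if used_name.startswith(prefix):
--                     pinned_prefixes.add(prefix)
--                     break
--
--     def priority(tool):
--         name = tool.get("function", {}).get("name", "")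
--         if any(name.startswith(p) for p in pinned_prefixes):
--             return 0
--         return 1 if any(name.startswith(p) for p in low_priority_prefixes) else 0
--
--     return sorted(tools, key=priority)[:limit]
-- ===== Notes on version B (the rewrite author's own statement) =====
-- stated objective: alternative
-- what changed: Replaces the core/low bucket partition plus concat-and-slice branches with a single stable sort on a binary priority key followed by one [:limit] slice (a stable sort on a 0/1 key is exactly a stable partition).
import Mathlib
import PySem

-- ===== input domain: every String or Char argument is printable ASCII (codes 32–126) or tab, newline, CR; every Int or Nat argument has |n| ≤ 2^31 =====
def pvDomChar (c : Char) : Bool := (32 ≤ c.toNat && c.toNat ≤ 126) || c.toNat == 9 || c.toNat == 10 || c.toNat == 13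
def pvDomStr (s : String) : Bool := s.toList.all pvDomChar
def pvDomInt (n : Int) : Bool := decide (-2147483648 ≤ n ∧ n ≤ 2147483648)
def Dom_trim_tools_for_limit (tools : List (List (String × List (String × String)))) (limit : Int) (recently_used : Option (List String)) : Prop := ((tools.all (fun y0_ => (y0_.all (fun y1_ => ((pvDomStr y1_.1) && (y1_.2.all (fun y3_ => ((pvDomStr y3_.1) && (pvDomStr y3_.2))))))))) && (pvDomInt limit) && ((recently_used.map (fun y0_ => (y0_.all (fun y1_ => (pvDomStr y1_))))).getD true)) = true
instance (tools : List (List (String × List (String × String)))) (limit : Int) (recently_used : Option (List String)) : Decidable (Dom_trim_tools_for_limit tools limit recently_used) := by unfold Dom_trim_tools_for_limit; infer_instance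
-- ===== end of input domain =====

-- B replaces A's core/low bucket partition and concat-and-slice branches by a stable sort on a
-- binary priority key followed by one [:limit] slice (objective: alternative, same cost class).

-- ===== PORT A =====
-- the low_priority_prefixes tuple (shared verbatim by both Pythons)
def pvLowPrefixes : List String :=
  ["mcp_", "commune_", "replicate_", "deploy_", "deployment_",
   "create_database", "desktop_", "organization_", "totp_"]

-- inner 'for prefix in low_priority_prefixes: … break' loop of the pinning pass
def pvPinOne (used : String) : List String → PySem.Set String → PySem.Set String
  | [], acc => acc
  | p :: rest, acc =>
      if PySem.Str.startswith used p then PySem.Set.add acc p else pvPinOne used rest acc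

-- 'pinned_prefixes' computation (identical lines in A and in B, hence one shared helper)
def pvPinned (recently_used : Option (List String)) : PySem.Set String :=
  match recently_used with
  | none => PySem.Set.empty
  | some names =>
      if names.isEmpty then PySem.Set.empty
      else names.foldl (fun acc u => pvPinOne u pvLowPrefixes acc) PySem.Set.empty

-- tool.get("function", {}).get("name", "")
def pvToolName (tool : List (String × List (String × String))) : String :=
  (PySem.Dict.mk ((PySem.Dict.mk tool).getD "function" [])).getD "name" ""

def trim_tools_for_limit (tools : List (List (String × List (String × String)))) (limit : Int) (recently_used : Option (List String)) : List (List (String × List (String × String))) :=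
  if limit ≤ 0 ∨ (tools.length : Int) ≤ limit then tools
  else
    let pinned := pvPinned recently_used
    let cl := tools.foldl
      (fun (s : List (List (String × List (String × String))) × List (List (String × List (String × String)))) tool =>
        let name := pvToolName tool
        if pinned.any (fun p => PySem.Str.startswith name p) then (s.1 ++ [tool], s.2)
        else if pvLowPrefixes.any (fun p => PySem.Str.startswith name p) then (s.1, s.2 ++ [tool])
        else (s.1 ++ [tool], s.2)) ([], [])
    let core := cl.1
    let low := cl.2
    let remaining := limit - (core.length : Int)
    if remaining > 0 then core ++ PySem.List.slice low none (some remaining)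
    else PySem.List.slice core none (some limit)

-- ===== PORT B =====
-- Source B's priority(tool): 0 if pinned or not low-priority, else 1
def pvPriority (pinned : PySem.Set String) (tool : List (String × List (String × String))) : Int :=
  if pinned.any (fun p => PySem.Str.startswith (pvToolName tool) p) then 0
  else if pvLowPrefixes.any (fun p => PySem.Str.startswith (pvToolName tool) p) then 1 else 0

def trim_tools_for_limit_alt (tools : List (List (String × List (String × String)))) (limit : Int) (recently_used : Option (List String)) : List (List (String × List (String × String))) :=
  if limit ≤ 0 ∨ (tools.length : Int) ≤ limit then tools
  else
    let pinned := pvPinned recently_used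
    PySem.List.slice (PySem.List.sorted tools (pvPriority pinned) false) none (some limit)

-- ===== PRECONDITION & SPEC =====
def Spec_trim_tools_for_limit (tools : List (List (String × List (String × String)))) (limit : Int) (recently_used : Option (List String)) (out : List (List (String × List (String × String)))) : Prop := out = trim_tools_for_limit_alt tools limit recently_used
instance (tools : List (List (String × List (String × String)))) (limit : Int) (recently_used : Option (List String)) (out : List (List (String × List (String × String)))) : Decidable (Spec_trim_tools_for_limit tools limit recently_used out) := by unfold Spec_trim_tools_for_limit; infer_instance

-- ===== CLAIM (what is proved, stated in full; the proofs are below) =====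
def Claim_equal_trim_tools_for_limit : Prop := ∀ (tools : List (List (String × List (String × String)))) (limit : Int) (recently_used : Option (List String)), Dom_trim_tools_for_limit tools limit recently_used → Spec_trim_tools_for_limit tools limit recently_used (trim_tools_for_limit tools limit recently_used)

-- ===== LEMMAS AND PROOFS =====

-- A's two-accumulator classification loop is the pair of filters under f
theorem pv_foldl_partition {α : Type} (f : α → Bool) (l : List α) (c0 c1 : List α) :
    l.foldl (fun (s : List α × List α) x =>
      if f x then (s.1 ++ [x], s.2) else (s.1, s.2 ++ [x])) (c0, c1)
    = (c0 ++ l.filter f, c1 ++ l.filter (fun x => !f x)) := by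
  induction l generalizing c0 c1 with
  | nil => simp
  | cons x t ih =>
    by_cases h : f x = true <;> simp [List.foldl_cons, h, ih]

-- inserting x before exactly the c1-block: insertion sort's step on an already partitioned list
theorem pv_insertBy_mid {α : Type} (before : α → α → Bool) (x : α) (c0 c1 : List α)
    (h0 : ∀ y ∈ c0, before x y = false) (h1 : ∀ y ∈ c1, before x y = true) :
    PySem.List.insertBy before x (c0 ++ c1) = c0 ++ x :: c1 := by
  induction c0 with
  | nil =>
    cases c1 with
    | nil => rfl
    | cons z t => simp [PySem.List.insertBy, h1 z (by simp)]
  | cons y t ih =>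
    simp only [List.cons_append, PySem.List.insertBy, h0 y (by simp), Bool.false_eq_true,
      if_false]
    rw [ih (fun z hz => h0 z (by simp [hz]))]

theorem pv_insertBy_end {α : Type} (before : α → α → Bool) (x : α) (ys : List α)
    (h : ∀ y ∈ ys, before x y = false) :
    PySem.List.insertBy before x ys = ys ++ [x] := by
  have := pv_insertBy_mid before x ys [] h (by simp)
  simpa using this

-- stable insertion sort on a 0/1-valued key is the stable partition
theorem pv_foldl_insertBy_binary {α : Type} (key : α → Int)
    (hk : ∀ x, key x = 0 ∨ key x = 1) (l : List α) (c0 c1 : List α)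
    (h0 : ∀ y ∈ c0, key y = 0) (h1 : ∀ y ∈ c1, key y = 1) :
    l.foldl (fun acc x => PySem.List.insertBy (fun a b => decide (key a < key b)) x acc) (c0 ++ c1)
    = (c0 ++ l.filter (fun x => key x == 0)) ++ (c1 ++ l.filter (fun x => !(key x == 0))) := by
  induction l generalizing c0 c1 with
  | nil => simp
  | cons x t ih =>
    rcases hk x with hx | hx
    · rw [List.foldl_cons,
        pv_insertBy_mid _ x c0 c1
          (fun y hy => by simp [hx, h0 y hy])
          (fun y hy => by simp [hx, h1 y hy]),
        show c0 ++ x :: c1 = (c0 ++ [x]) ++ c1 by simp,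
        ih (c0 ++ [x]) c1
          (fun y hy => by rcases List.mem_append.1 hy with h | h; exact h0 y h; simp_all)
          h1]
      simp [hx]
    · rw [List.foldl_cons,
        pv_insertBy_end _ x (c0 ++ c1)
          (fun y hy => by
            rcases List.mem_append.1 hy with h | h
            · simp [hx, h0 y h]
            · simp [hx, h1 y h]),
        show (c0 ++ c1) ++ [x] = c0 ++ (c1 ++ [x]) by simp,
        ih c0 (c1 ++ [x]) h0
          (fun y hy => by rcases List.mem_append.1 hy with h | h; exact h1 y h; simp_all)]
      simp [hx]

theorem pv_sorted_binary {α : Type} (key : α → Int)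
    (hk : ∀ x, key x = 0 ∨ key x = 1) (l : List α) :
    PySem.List.sorted l key false
    = l.filter (fun x => key x == 0) ++ l.filter (fun x => !(key x == 0)) := by
  rw [PySem.List.sorted_eq_foldl_insertBy]
  have := pv_foldl_insertBy_binary key hk l [] [] (by simp) (by simp)
  simpa using this

-- pvPriority takes only the values 0 and 1
theorem pv_priority_binary (pinned : PySem.Set String)
    (t : List (String × List (String × String))) :
    pvPriority pinned t = 0 ∨ pvPriority pinned t = 1 := by
  unfold pvPriority
  split_ifs <;> simp

-- ===== VERDICT (by name: the statement is the Claim_ definition above) =====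
theorem trim_tools_for_limit_spec : Claim_equal_trim_tools_for_limit := by
  intro tools limit recently_used _
  unfold Spec_trim_tools_for_limit trim_tools_for_limit trim_tools_for_limit_alt
  by_cases hg : limit ≤ 0 ∨ (tools.length : Int) ≤ limit
  · simp [hg]
  · simp only [hg, if_false]
    rw [not_or] at hg
    obtain ⟨hl, hlen⟩ := hg
    obtain ⟨n, hn⟩ : ∃ n : Nat, limit = (n : Int) := ⟨limit.toNat, (Int.toNat_of_nonneg (by omega)).symm⟩
    subst hn
    set pinned := pvPinned recently_used with hp
    set key := pvPriority pinned with hkdef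
    -- A's loop is the pair of filters under (key · == 0)
    have hfun :
        (fun (s : List (List (String × List (String × String))) × List (List (String × List (String × String)))) tool =>
          let name := pvToolName tool
          if pinned.any (fun p => PySem.Str.startswith name p) then (s.1 ++ [tool], s.2)
          else if pvLowPrefixes.any (fun p => PySem.Str.startswith name p) then (s.1, s.2 ++ [tool])
          else (s.1 ++ [tool], s.2))
        = (fun (s : List (List (String × List (String × String))) × List (List (String × List (String × String)))) x =>
          if (key x == 0 : Bool) then (s.1 ++ [x], s.2) else (s.1, s.2 ++ [x])) := by
      funext s x
      simp only [hkdef, pvPriority]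
      split_ifs <;> simp_all
    rw [hfun, pv_foldl_partition (fun x => (key x == 0 : Bool)) tools [] []]
    simp only [List.nil_append]
    set core := tools.filter (fun t => key t == 0) with hc
    set low := tools.filter (fun t => !(key t == 0)) with hlow
    rw [pv_sorted_binary key (pv_priority_binary pinned) tools, ← hc, ← hlow]
    by_cases hr : (n : Int) - (core.length : Int) > 0
    · have hco : ((n : Int) - (core.length : Int)) = ((n - core.length : Nat) : Int) := by omega
      rw [if_pos hr, hco, PySem.List.slice_to_natCast, PySem.List.slice_to_natCast,
        List.take_append, List.take_of_length_le (by omega : core.length ≤ n)]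
    · rw [if_neg hr, PySem.List.slice_to_natCast, PySem.List.slice_to_natCast,
        List.take_append, show n - core.length = 0 by omega]
      simp
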